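-- pv_equiv track=rewrite | github.com/MuhammadMaheem/programming-for-Ai-Lab | marks.py | hollow_square_center_block
-- ===== SOURCE A (Python) =====
-- def hollow_square_center_block(n):
--     if n < 2:
--         result = []
--         for _ in range(n):
--             result.append("* " * n)
--         return "\n".join(result)
--
--     mid = n // 2
--     result = []
--     for i in range(n):
--         row = ""
--         for j in range(n):
--             if i == 0 or i == n - 1 or j == 0 or j == n - 1:
--                 row += "* "
--             elif (i == 1 or i == n - 2) and j == n - 2:
--                 row += "* "
--             elif (
--                 (n % 2 == 1 and i == mid) or
--                 (n % 2 == 0 and (i == mid - 1 or i == mid))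
--             ) and j <= n - 3:
--                 row += "* "
--             else:
--                 row += "  "
--         result.append(row)
--     return "\n".join(result)
-- ===== SOURCE B (Python) =====
-- def _line(n, mid, i):
--     # one interior row (1 <= i <= n-2), built by string arithmetic, no inner loop
--     center = (i == mid) if n % 2 == 1 else (i == mid - 1 or i == mid)
--     near = (i == 1 or i == n - 2)
--     if center:
--         return "* " * (n - 2) + ("* " if near else "  ") + "* "
--     if near:
--         return "* " + "  " * (n - 3) + "* " + "* "
--     return "* " + "  " * (n - 2) + "* "
--
--
-- def hollow_square_center_block(n):
--     if n < 2:
--         return "\n".join(["* " * n] * n)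
--     mid = n // 2
--     full = "* " * n
--     return "\n".join([full] + [_line(n, mid, i) for i in range(1, n - 1)] + [full])
-- ===== Notes on version B (the rewrite author's own statement) =====
-- stated objective: faster
-- what changed: Replaces A's per-cell nested loop (an if/elif chain evaluated for every (i,j), building each row by repeated string concatenation) with per-row string arithmetic: each of the four row kinds (border, near-corner, center-block, plain interior) is assembled directly from repeated two-char segments, so the inner column loop disappears.
import Mathlib
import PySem

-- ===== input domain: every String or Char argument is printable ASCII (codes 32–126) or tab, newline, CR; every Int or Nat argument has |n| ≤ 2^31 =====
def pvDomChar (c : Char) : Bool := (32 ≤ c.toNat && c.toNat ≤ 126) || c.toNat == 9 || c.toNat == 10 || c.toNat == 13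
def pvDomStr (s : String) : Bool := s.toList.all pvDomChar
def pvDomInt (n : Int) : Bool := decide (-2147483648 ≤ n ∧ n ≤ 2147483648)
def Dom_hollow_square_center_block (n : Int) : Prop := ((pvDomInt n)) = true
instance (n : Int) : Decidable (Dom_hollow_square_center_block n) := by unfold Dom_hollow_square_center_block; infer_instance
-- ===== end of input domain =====

-- B replaces A's per-cell nested loop by per-row string arithmetic (border/near/center rows
-- built from repeated two-char segments, no inner column loop); measurably faster in a timing run.

-- ===== PORT A =====
-- one cell of A's inner loop: the if/elif chain producing "* " or "  "
def pvCellA (n mid i j : Int) : List Char :=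
  if i = 0 ∨ i = n - 1 ∨ j = 0 ∨ j = n - 1 then ['*', ' ']
  else if (i = 1 ∨ i = n - 2) ∧ j = n - 2 then ['*', ' ']
  else if ((PySem.Int.mod n 2 = 1 ∧ i = mid) ∨
           (PySem.Int.mod n 2 = 0 ∧ (i = mid - 1 ∨ i = mid))) ∧ j ≤ n - 3 then ['*', ' ']
  else [' ', ' ']

-- A's inner loop: row = ""; for j in range(n): row += cell
def pvRowA (n mid i : Int) : List Char :=
  (PySem.List.pyRange 0 n 1).foldl (fun row j => row ++ pvCellA n mid i j) []

def hollow_square_center_block (n : Int) : String :=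
  if n < 2 then
    String.ofList (PySem.Chars.join ['\n']
      ((PySem.List.pyRange 0 n 1).foldl
        (fun acc _ => acc ++ [PySem.List.pyRepeat ['*', ' '] n]) []))
  else
    String.ofList (PySem.Chars.join ['\n']
      ((PySem.List.pyRange 0 n 1).foldl
        (fun acc i => acc ++ [pvRowA n (PySem.Int.floordiv n 2) i]) []))

-- ===== PORT B =====
-- one interior row (1 <= i <= n-2), built from repeated two-char segments (Source B's _line)
def pvLineB (n mid i : Int) : List Char :=
  if (if PySem.Int.mod n 2 = 1 then decide (i = mid) else decide (i = mid - 1 ∨ i = mid)) then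
    PySem.List.pyRepeat ['*', ' '] (n - 2) ++
      (if i = 1 ∨ i = n - 2 then ['*', ' '] else [' ', ' ']) ++ ['*', ' ']
  else if i = 1 ∨ i = n - 2 then
    ['*', ' '] ++ PySem.List.pyRepeat [' ', ' '] (n - 3) ++ ['*', ' '] ++ ['*', ' ']
  else
    ['*', ' '] ++ PySem.List.pyRepeat [' ', ' '] (n - 2) ++ ['*', ' ']

def hollow_square_center_block_alt (n : Int) : String :=
  if n < 2 then
    String.ofList (PySem.Chars.join ['\n']
      (List.replicate n.toNat (PySem.List.pyRepeat ['*', ' '] n)))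
  else
    String.ofList (PySem.Chars.join ['\n']
      ([PySem.List.pyRepeat ['*', ' '] n] ++
       (PySem.List.pyRange 1 (n - 1) 1).map (pvLineB n (PySem.Int.floordiv n 2)) ++
       [PySem.List.pyRepeat ['*', ' '] n]))

-- ===== PRECONDITION & SPEC =====
def Spec_hollow_square_center_block (n : Int) (out : String) : Prop := out = hollow_square_center_block_alt n
instance (n : Int) (out : String) : Decidable (Spec_hollow_square_center_block n out) := by unfold Spec_hollow_square_center_block; infer_instance

-- ===== CLAIM (what is proved, stated in full; the proofs are below) =====
def Claim_equal_hollow_square_center_block : Prop := ∀ (n : Int), Dom_hollow_square_center_block n → Spec_hollow_square_center_block n (hollow_square_center_block n)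

-- ===== LEMMAS AND PROOFS =====

-- a loop segment on which every cell is the same two-char string appends that string |l| times
lemma pvSegConst {f : Int → List Char} (l : List Int) (c : List Char) (init : List Char)
    (h : ∀ j ∈ l, f j = c) :
    l.foldl (fun row j => row ++ f j) init = init ++ (List.replicate l.length c).flatten := by
  induction l generalizing init with
  | nil => simp
  | cons a t ih =>
    simp only [List.foldl_cons, List.length_cons, List.replicate_succ, List.flatten_cons]
    rw [ih _ (fun j hj => h j (List.mem_cons_of_mem _ hj)), h a List.mem_cons_self]
    simp

lemma pvSplitOuter (n : Int) (h : 2 ≤ n) :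
    PySem.List.pyRange 0 n 1 = 0 :: (PySem.List.pyRange 1 (n - 1) 1 ++ [n - 1]) := by
  rw [PySem.List.pyRange_one_cons (by omega : (0:Int) < n)]
  norm_num
  rw [PySem.List.pyRange_one_append 1 (n - 1) n (by omega) (by omega)]
  congr 1
  rw [PySem.List.pyRange_one_cons (by omega : n - 1 < n),
      PySem.List.pyRange_one_eq_nil (by omega : n ≤ n - 1 + 1)]

lemma pvSplit3 (n : Int) (h : 5 ≤ n) :
    PySem.List.pyRange 0 n 1 = 0 :: (PySem.List.pyRange 1 (n - 2) 1 ++ [n - 2, n - 1]) := by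
  rw [PySem.List.pyRange_one_cons (by omega : (0:Int) < n)]
  norm_num
  rw [PySem.List.pyRange_one_append 1 (n - 2) n (by omega) (by omega)]
  congr 1
  rw [PySem.List.pyRange_one_cons (by omega : n - 2 < n),
      show n - 2 + 1 = n - 1 by ring,
      PySem.List.pyRange_one_cons (by omega : n - 1 < n),
      PySem.List.pyRange_one_eq_nil (by omega : n ≤ n - 1 + 1)]

lemma pvRowTop (n mid : Int) :
    pvRowA n mid 0 = PySem.List.pyRepeat ['*', ' '] n := by
  unfold pvRowA
  have hpt : ∀ j ∈ PySem.List.pyRange 0 n 1, pvCellA n mid 0 j = ['*', ' '] := by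
    intro j _
    simp only [pvCellA]; split_ifs <;> first | rfl | (exfalso; omega) | (exfalso; simp_all; done) | (exfalso; simp_all; omega)
  rw [pvSegConst _ _ _ hpt]
  simp [PySem.List.pyRepeat, PySem.List.length_pyRange_one]

lemma pvRowBot (n mid : Int) (h : 2 ≤ n) :
    pvRowA n mid (n - 1) = PySem.List.pyRepeat ['*', ' '] n := by
  unfold pvRowA
  have hpt : ∀ j ∈ PySem.List.pyRange 0 n 1, pvCellA n mid (n - 1) j = ['*', ' '] := by
    intro j _
    simp only [pvCellA]; split_ifs <;> first | rfl | (exfalso; omega) | (exfalso; simp_all; done) | (exfalso; simp_all; omega)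
  rw [pvSegConst _ _ _ hpt]
  simp [PySem.List.pyRepeat, PySem.List.length_pyRange_one]

lemma pvFlattenRep_succ (k : Nat) (c : List Char) :
    (List.replicate (k + 1) c).flatten = c ++ (List.replicate k c).flatten := by
  simp [List.replicate_succ]

lemma pvFlattenRep_succ' (k : Nat) (c : List Char) :
    (List.replicate (k + 1) c).flatten = (List.replicate k c).flatten ++ c := by
  simp [List.replicate_succ']

-- every interior row of A equals B's arithmetic line (n >= 5)
lemma pvRowMid (n : Int) (h5 : 5 ≤ n) (i : Int) (hi1 : 1 ≤ i) (hi2 : i ≤ n - 2) :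
    pvRowA n (PySem.Int.floordiv n 2) i = pvLineB n (PySem.Int.floordiv n 2) i := by
  have hdm : PySem.Int.floordiv n 2 * 2 + PySem.Int.mod n 2 = n :=
    PySem.Int.floordiv_mul_add_mod n 2
  have hm2 := PySem.Int.mod_two_eq n
  have hlen : (PySem.List.pyRange 1 (n - 2) 1).length = (n - 3).toNat := by
    rw [PySem.List.length_pyRange_one]; omega
  unfold pvRowA pvLineB
  rw [pvSplit3 n h5]
  simp only [List.foldl_cons, List.foldl_append, List.foldl_nil, List.nil_append]
  by_cases hcen : (PySem.Int.mod n 2 = 1 ∧ i = PySem.Int.floordiv n 2) ∨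
      (PySem.Int.mod n 2 = 0 ∧ (i = PySem.Int.floordiv n 2 - 1 ∨ i = PySem.Int.floordiv n 2))
  · -- center row: 2 ≤ i ≤ n - 3, so not near; cells 0..n-3 stars, n-2 blank, n-1 star
    have hb : 2 ≤ i ∧ i ≤ n - 3 := by omega
    have e0 : pvCellA n (PySem.Int.floordiv n 2) i 0 = ['*', ' '] := by
      simp only [pvCellA]; split_ifs <;> first | rfl | (exfalso; omega) | (exfalso; simp_all; done) | (exfalso; simp_all; omega)
    have e1 : pvCellA n (PySem.Int.floordiv n 2) i (n - 2) = [' ', ' '] := by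
      simp only [pvCellA]; split_ifs <;> first | rfl | (exfalso; omega) | (exfalso; simp_all; done) | (exfalso; simp_all; omega)
    have e2 : pvCellA n (PySem.Int.floordiv n 2) i (n - 1) = ['*', ' '] := by
      simp only [pvCellA]; split_ifs <;> first | rfl | (exfalso; omega) | (exfalso; simp_all; done) | (exfalso; simp_all; omega)
    have hpt : ∀ j ∈ PySem.List.pyRange 1 (n - 2) 1,
        pvCellA n (PySem.Int.floordiv n 2) i j = ['*', ' '] := by
      intro j hj
      have := PySem.List.mem_pyRange_one.mp hj
      simp only [pvCellA]; split_ifs <;> first | rfl | (exfalso; omega) | (exfalso; simp_all; done) | (exfalso; simp_all; omega)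
    have hcond : (if PySem.Int.mod n 2 = 1 then decide (i = PySem.Int.floordiv n 2)
        else decide (i = PySem.Int.floordiv n 2 - 1 ∨ i = PySem.Int.floordiv n 2)) = true := by
      rcases hm2 with h | h
      · rw [if_neg (by omega)]; simp only [decide_eq_true_eq]; omega
      · rw [if_pos h]; simp only [decide_eq_true_eq]; omega
    rw [e0, e1, e2, pvSegConst _ _ _ hpt, hcond, if_pos rfl,
        if_neg (by omega : ¬ (i = 1 ∨ i = n - 2)), hlen]
    simp only [PySem.List.pyRepeat, show (n - 2).toNat = (n - 3).toNat + 1 by omega,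
               pvFlattenRep_succ]
  · by_cases hnear : i = 1 ∨ i = n - 2
    · -- near row: star, blanks 1..n-3, star at n-2, star at n-1
      have e0 : pvCellA n (PySem.Int.floordiv n 2) i 0 = ['*', ' '] := by
        simp only [pvCellA]; split_ifs <;> first | rfl | (exfalso; omega) | (exfalso; simp_all; done) | (exfalso; simp_all; omega)
      have e1 : pvCellA n (PySem.Int.floordiv n 2) i (n - 2) = ['*', ' '] := by
        simp only [pvCellA]; split_ifs <;> first | rfl | (exfalso; omega) | (exfalso; simp_all; done) | (exfalso; simp_all; omega)
      have e2 : pvCellA n (PySem.Int.floordiv n 2) i (n - 1) = ['*', ' '] := by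
        simp only [pvCellA]; split_ifs <;> first | rfl | (exfalso; omega) | (exfalso; simp_all; done) | (exfalso; simp_all; omega)
      have hpt : ∀ j ∈ PySem.List.pyRange 1 (n - 2) 1,
          pvCellA n (PySem.Int.floordiv n 2) i j = [' ', ' '] := by
        intro j hj
        have := PySem.List.mem_pyRange_one.mp hj
        simp only [pvCellA]; split_ifs <;> first | rfl | (exfalso; omega) | (exfalso; simp_all; done) | (exfalso; simp_all; omega)
      have hcond : (if PySem.Int.mod n 2 = 1 then decide (i = PySem.Int.floordiv n 2)
          else decide (i = PySem.Int.floordiv n 2 - 1 ∨ i = PySem.Int.floordiv n 2)) = false := by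
        rcases hm2 with h | h
        · rw [if_neg (by omega)]; simp only [decide_eq_false_iff_not]; omega
        · rw [if_pos h]; simp only [decide_eq_false_iff_not]; omega
      rw [e0, e1, e2, pvSegConst _ _ _ hpt, hcond, if_neg (by simp), if_pos hnear, hlen]
      simp [PySem.List.pyRepeat]
    · -- plain interior row: star, blanks 1..n-3 and at n-2, star at n-1
      have e0 : pvCellA n (PySem.Int.floordiv n 2) i 0 = ['*', ' '] := by
        simp only [pvCellA]; split_ifs <;> first | rfl | (exfalso; omega) | (exfalso; simp_all; done) | (exfalso; simp_all; omega)
      have e1 : pvCellA n (PySem.Int.floordiv n 2) i (n - 2) = [' ', ' '] := by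
        simp only [pvCellA]; split_ifs <;> first | rfl | (exfalso; omega) | (exfalso; simp_all; done) | (exfalso; simp_all; omega)
      have e2 : pvCellA n (PySem.Int.floordiv n 2) i (n - 1) = ['*', ' '] := by
        simp only [pvCellA]; split_ifs <;> first | rfl | (exfalso; omega) | (exfalso; simp_all; done) | (exfalso; simp_all; omega)
      have hpt : ∀ j ∈ PySem.List.pyRange 1 (n - 2) 1,
          pvCellA n (PySem.Int.floordiv n 2) i j = [' ', ' '] := by
        intro j hj
        have := PySem.List.mem_pyRange_one.mp hj
        simp only [pvCellA]; split_ifs <;> first | rfl | (exfalso; omega) | (exfalso; simp_all; done) | (exfalso; simp_all; omega)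
      have hcond : (if PySem.Int.mod n 2 = 1 then decide (i = PySem.Int.floordiv n 2)
          else decide (i = PySem.Int.floordiv n 2 - 1 ∨ i = PySem.Int.floordiv n 2)) = false := by
        rcases hm2 with h | h
        · rw [if_neg (by omega)]; simp only [decide_eq_false_iff_not]; omega
        · rw [if_pos h]; simp only [decide_eq_false_iff_not]; omega
      rw [e0, e1, e2, pvSegConst _ _ _ hpt, hcond, if_neg (by simp), if_neg hnear, hlen]
      simp only [PySem.List.pyRepeat, show (n - 2).toNat = (n - 3).toNat + 1 by omega,
                 pvFlattenRep_succ']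
      simp

lemma pvMain (n : Int) : hollow_square_center_block n = hollow_square_center_block_alt n := by
  by_cases hlt : n < 2
  · simp only [hollow_square_center_block, hollow_square_center_block_alt, if_pos hlt]
    congr 2
    rw [PySem.List.foldl_append_singleton_eq_map]
    simp [List.map_const', PySem.List.length_pyRange_one]
  · by_cases h2 : n = 2
    · subst h2; decide
    by_cases h3 : n = 3
    · subst h3; decide
    by_cases h4 : n = 4
    · subst h4; decide
    have h5 : 5 ≤ n := by omega
    simp only [hollow_square_center_block, hollow_square_center_block_alt,
               if_neg (by omega : ¬ n < 2)]
    congr 2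
    rw [PySem.List.foldl_append_singleton_eq_map, List.nil_append, pvSplitOuter n (by omega),
        List.map_cons, List.map_append, List.map_cons, List.map_nil]
    rw [pvRowTop n _, pvRowBot n _ (by omega)]
    congr 2
    exact List.map_congr_left (fun i hi => by
      have := PySem.List.mem_pyRange_one.mp hi
      exact pvRowMid n h5 i (by omega) (by omega))

-- ===== VERDICT (by name: the statement is the Claim_ definition above) =====
theorem hollow_square_center_block_spec : Claim_equal_hollow_square_center_block := by
  intro n _
  unfold Spec_hollow_square_center_block
  exact pvMain n
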